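-- pv_equiv track=rewrite | github.com/abidanBrito/infosec | P1/rsa_bank/rsa_bank.py | add_multiple_transactions
-- ===== SOURCE A (Python) =====
-- def add_multiple_transactions(transactions, dividend, divisor, ct, n):
--     square = divisor * divisor
--     if dividend % square == 0:
--         new_ct = ct * ct
--         transactions.update({str(square) : new_ct % n})
--     else:
--         return divisor
--
--     return add_multiple_transactions(transactions, dividend, square, new_ct, n)
-- ===== SOURCE B (Python) =====
-- def add_multiple_transactions(transactions, dividend, divisor, ct, n):
--     # Iterative: gather the chain of (key, value) updates first, apply them in
--     # one dict.update at the end, and return the last divisor whose square divides.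
--     d, c = divisor, ct
--     updates = []
--     while dividend % (d * d) == 0:
--         d, c = d * d, c * c
--         updates.append((str(d), c % n))
--     transactions.update(updates)
--     return d
-- ===== Notes on version B (the rewrite author's own statement) =====
-- stated objective: alternative
-- what changed: Replaces A's tail recursion threading five parameters by an iterative while-loop over two locals that first collects the (key, value) chain in a list and applies it with a single dict.update at the end.
import Mathlib
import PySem

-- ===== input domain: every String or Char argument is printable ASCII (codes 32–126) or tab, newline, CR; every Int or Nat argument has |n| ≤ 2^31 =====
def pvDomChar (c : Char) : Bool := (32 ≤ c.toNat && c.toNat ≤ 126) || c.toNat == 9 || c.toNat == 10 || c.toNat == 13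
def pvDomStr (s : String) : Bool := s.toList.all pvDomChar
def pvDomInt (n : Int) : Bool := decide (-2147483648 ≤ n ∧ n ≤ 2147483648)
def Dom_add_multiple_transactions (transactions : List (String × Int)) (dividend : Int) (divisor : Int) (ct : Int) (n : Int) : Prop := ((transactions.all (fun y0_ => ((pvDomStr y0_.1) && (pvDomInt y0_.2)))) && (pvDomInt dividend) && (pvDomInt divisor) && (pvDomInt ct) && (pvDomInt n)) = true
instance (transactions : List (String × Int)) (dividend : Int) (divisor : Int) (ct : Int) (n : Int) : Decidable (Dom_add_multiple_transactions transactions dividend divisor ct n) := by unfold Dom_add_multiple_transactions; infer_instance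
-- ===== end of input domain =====

-- B replaces A's tail recursion by an iterative loop that collects the updates in a list
-- and applies them in one dict.update at the end; equivalence is about the RETURN value
-- (both programs perform the same in-place updates to `transactions`, in the same order).

-- ===== PORT A =====
-- A's tail recursion, made total with fuel (fuel only guards termination; it is never
-- exhausted on inputs satisfying Pre_). The dict is threaded exactly as A threads it.
def amtFuelA (fuel : Nat) (transactions : PySem.Dict String Int) (dividend : Int) (divisor : Int) (ct : Int) (n : Int) : Int :=
  match fuel with
  | 0 => divisor
  | fuel + 1 =>
    let square := divisor * divisor
    if PySem.Int.mod dividend square = 0 then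
      let new_ct := ct * ct
      let t' := transactions.insert (PySem.Int.toStr square) (PySem.Int.mod new_ct n)
      amtFuelA fuel t' dividend square new_ct n
    else divisor

def add_multiple_transactions (transactions : List (String × Int)) (dividend : Int) (divisor : Int) (ct : Int) (n : Int) : Int :=
  amtFuelA (dividend.natAbs + 2) (PySem.Dict.mk transactions) dividend divisor ct n

-- ===== PORT B =====
-- B's while-loop: state (d, c) plus the accumulated update list; same fuel guard.
def amtLoopB (fuel : Nat) (dividend : Int) (d : Int) (c : Int) (n : Int) (updates : List (String × Int)) : Int × List (String × Int) :=
  match fuel with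
  | 0 => (d, updates)
  | fuel + 1 =>
    if PySem.Int.mod dividend (d * d) = 0 then
      let d' := d * d
      let c' := c * c
      amtLoopB fuel dividend d' c' n (updates ++ [(PySem.Int.toStr d', PySem.Int.mod c' n)])
    else (d, updates)

def add_multiple_transactions_alt (transactions : List (String × Int)) (dividend : Int) (divisor : Int) (ct : Int) (n : Int) : Int :=
  let r := amtLoopB (dividend.natAbs + 2) dividend divisor ct n []
  let _ := r.2.foldl (fun t p => t.insert p.1 p.2) (PySem.Dict.mk transactions)  -- transactions.update(updates)
  r.1

-- ===== PRECONDITION & SPEC =====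
-- Pre_ excludes exactly the inputs where Python A raises: dividend = 0 or |divisor| ≤ 1
-- (ZeroDivisionError / unbounded recursion → RecursionError), and n = 0 when the first
-- update fires (ZeroDivisionError on ct*ct % n).
def Pre_add_multiple_transactions (transactions : List (String × Int)) (dividend : Int) (divisor : Int) (ct : Int) (n : Int) : Prop :=
  dividend ≠ 0 ∧ 2 ≤ divisor.natAbs ∧ (n ≠ 0 ∨ PySem.Int.mod dividend (divisor * divisor) ≠ 0)
instance (transactions : List (String × Int)) (dividend : Int) (divisor : Int) (ct : Int) (n : Int) : Decidable (Pre_add_multiple_transactions transactions dividend divisor ct n) := by unfold Pre_add_multiple_transactions; infer_instance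

def pvWitness_add_multiple_transactions : (List (String × Int)) × Int × Int × Int × Int := ([("1", 7)], 16, 2, 3, 5)

def Spec_add_multiple_transactions (transactions : List (String × Int)) (dividend : Int) (divisor : Int) (ct : Int) (n : Int) (out : Int) : Prop := out = add_multiple_transactions_alt transactions dividend divisor ct n
instance (transactions : List (String × Int)) (dividend : Int) (divisor : Int) (ct : Int) (n : Int) (out : Int) : Decidable (Spec_add_multiple_transactions transactions dividend divisor ct n out) := by unfold Spec_add_multiple_transactions; infer_instance

-- ===== CLAIM (what is proved, stated in full; the proofs are below) =====
def Claim_equal_add_multiple_transactions : Prop := ∀ (transactions : List (String × Int)) (dividend : Int) (divisor : Int) (ct : Int) (n : Int), Dom_add_multiple_transactions transactions dividend divisor ct n → Pre_add_multiple_transactions transactions dividend divisor ct n → Spec_add_multiple_transactions transactions dividend divisor ct n (add_multiple_transactions transactions dividend divisor ct n)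

-- ===== LEMMAS AND PROOFS =====
-- The two loops run in lockstep: the same fuel, the same test, the same (d, c) state;
-- A's dict state and B's update list do not influence the returned integer.
theorem amt_loops_agree (fuel : Nat) (dividend d c n : Int)
    (t : PySem.Dict String Int) (acc : List (String × Int)) :
    amtFuelA fuel t dividend d c n = (amtLoopB fuel dividend d c n acc).1 := by
  induction fuel generalizing d c t acc with
  | zero => rfl
  | succ fuel ih =>
    simp only [amtFuelA, amtLoopB]
    split_ifs with h
    · exact ih _ _ _ _
    · rfl

-- ===== VERDICT (by name: the statement is the Claim_ definition above) =====
theorem add_multiple_transactions_spec : Claim_equal_add_multiple_transactions := by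
  intro transactions dividend divisor ct n _ _
  unfold Spec_add_multiple_transactions add_multiple_transactions add_multiple_transactions_alt
  exact amt_loops_agree _ _ _ _ _ _ _
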